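-- pv_equiv track=rewrite | github.com/elysia090/Lab | src/utilities/fractals/sierpinski_carpet_plotly.py | construct_sierpinski_carpet
-- ===== SOURCE A (Python) =====
-- def construct_sierpinski_carpet(iterations: int) -> list[tuple[int, int]]:
--     """
--     Construct a 2D Sierpinski carpet up to the specified number of iterations.
--
--     Args:
--         iterations (int): Number of recursion steps.
--
--     Returns:
--         list[tuple[int, int]]: List of occupied square coordinates.
--     """
--     squares = [(0, 0)]
--     for it in range(iterations):
--         new_squares = []
--         for (x, y) in squares:
--             # Subdivide the current square into 9 subsquares
--             for dx, dy in [(0, 0), (0, 1), (0, 2),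
--                            (1, 0), (1, 2),
--                            (2, 0), (2, 1), (2, 2)]:
--                 # Skip the center square
--                 if dx == 1 and dy == 1:
--                     continue
--                 new_squares.append((x * 3 + dx, y * 3 + dy))
--         squares = new_squares
--     return squares
-- ===== SOURCE B (Python) =====
-- def construct_sierpinski_carpet(iterations: int) -> list[tuple[int, int]]:
--     """Recursive DFS over the self-similar structure instead of level-by-level rebuilds."""
--     offsets = [(0, 0), (0, 1), (0, 2),
--                (1, 0), (1, 2),
--                (2, 0), (2, 1), (2, 2)]
--
--     def rec(it: int, x: int, y: int) -> list[tuple[int, int]]: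
--         if it <= 0:
--             return [(x, y)]
--         out = []
--         for dx, dy in offsets:
--             out.extend(rec(it - 1, x * 3 + dx, y * 3 + dy))
--         return out
--
--     return rec(iterations, 0, 0)
-- ===== Notes on version B (the rewrite author's own statement) =====
-- stated objective: alternative
-- what changed: Replaces A's iterative level-by-level rebuild of the whole square list with a depth-first recursion on the self-similar structure (rec(it-1, 3x+dx, 3y+dy) concatenated over the eight offsets), producing the same list in the same order.
import Mathlib
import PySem

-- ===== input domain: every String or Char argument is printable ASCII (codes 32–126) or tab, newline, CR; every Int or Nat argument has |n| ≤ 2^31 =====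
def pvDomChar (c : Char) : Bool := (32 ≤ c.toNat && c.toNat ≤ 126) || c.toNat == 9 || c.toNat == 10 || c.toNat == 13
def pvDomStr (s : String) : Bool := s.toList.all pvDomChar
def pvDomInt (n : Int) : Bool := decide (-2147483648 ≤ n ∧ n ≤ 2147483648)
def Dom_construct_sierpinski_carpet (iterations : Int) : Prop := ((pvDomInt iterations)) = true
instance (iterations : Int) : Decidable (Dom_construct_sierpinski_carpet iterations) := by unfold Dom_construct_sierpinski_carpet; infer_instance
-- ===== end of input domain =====

-- B replaces A's iterative level-by-level rebuild with a depth-first recursion over the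
-- self-similar structure (same eight-offset order, hence the identical list); objective: alternative.


-- the shared literal offset list (dx, dy) of both Pythons
def carpetOffsets : List (Int × Int) :=
  [(0, 0), (0, 1), (0, 2), (1, 0), (1, 2), (2, 0), (2, 1), (2, 2)]

-- ===== PORT A =====
-- one pass of A's outer loop body: rebuild new_squares from squares
def carpetStep (squares : List (Int × Int)) : List (Int × Int) :=
  squares.foldl (fun ns p =>
    carpetOffsets.foldl (fun ns d =>
      if d.1 = 1 ∧ d.2 = 1 then ns
      else ns ++ [(p.1 * 3 + d.1, p.2 * 3 + d.2)]) ns) []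

def construct_sierpinski_carpet (iterations : Int) : List (Int × Int) :=
  (PySem.List.pyRange 0 iterations 1).foldl (fun squares _ => carpetStep squares) [(0, 0)]

-- ===== PORT B =====
def carpetRec : Nat → Int → Int → List (Int × Int)
  | 0, x, y => [(x, y)]
  | n + 1, x, y =>
      carpetOffsets.foldl (fun out d => out ++ carpetRec n (x * 3 + d.1) (y * 3 + d.2)) []

-- rec's base case is `it <= 0`, so negative iterations behave like 0: `.toNat`
def construct_sierpinski_carpet_alt (iterations : Int) : List (Int × Int) :=
  carpetRec iterations.toNat 0 0

-- ===== PRECONDITION & SPEC =====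
def Spec_construct_sierpinski_carpet (iterations : Int) (out : List (Int × Int)) : Prop := out = construct_sierpinski_carpet_alt iterations
instance (iterations : Int) (out : List (Int × Int)) : Decidable (Spec_construct_sierpinski_carpet iterations out) := by unfold Spec_construct_sierpinski_carpet; infer_instance

-- ===== CLAIM (what is proved, stated in full; the proofs are below) =====
def Claim_equal_construct_sierpinski_carpet : Prop := ∀ (iterations : Int), Dom_construct_sierpinski_carpet iterations → Spec_construct_sierpinski_carpet iterations (construct_sierpinski_carpet iterations)

-- ===== LEMMAS AND PROOFS =====

-- the 8 children of a square, in offset order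
def carpetChildren (p : Int × Int) : List (Int × Int) :=
  carpetOffsets.map (fun d => (p.1 * 3 + d.1, p.2 * 3 + d.2))

-- B's inner loop, as a flatMap
theorem carpet_bfold (f : Int × Int → List (Int × Int)) (acc : List (Int × Int)) :
    carpetOffsets.foldl (fun out d => out ++ f d) acc = acc ++ carpetOffsets.flatMap f := by
  simp [carpetOffsets, List.foldl]

-- A's loop body (one level of subdivision), as a flatMap
theorem carpetStep_eq_flatMap (l : List (Int × Int)) :
    carpetStep l = l.flatMap carpetChildren := by
  have inner : ∀ (p : Int × Int) (ns : List (Int × Int)),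
      carpetOffsets.foldl (fun ns d =>
        if d.1 = 1 ∧ d.2 = 1 then ns
        else ns ++ [(p.1 * 3 + d.1, p.2 * 3 + d.2)]) ns = ns ++ carpetChildren p := by
    intro p ns
    simp [carpetOffsets, carpetChildren, List.foldl]
  have gen : ∀ (l : List (Int × Int)) (ns : List (Int × Int)),
      l.foldl (fun ns p =>
        carpetOffsets.foldl (fun ns d =>
          if d.1 = 1 ∧ d.2 = 1 then ns
          else ns ++ [(p.1 * 3 + d.1, p.2 * 3 + d.2)]) ns) ns = ns ++ l.flatMap carpetChildren := by
    intro l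
    induction l with
    | nil => simp
    | cons p t ih =>
        intro ns
        rw [List.foldl_cons, inner p ns, ih, List.flatMap_cons, List.append_assoc]
  simpa using gen l []

-- peeling one subdivision off the TOP of B's recursion
theorem carpetRec_succ_flat (n : Nat) (x y : Int) :
    carpetRec (n + 1) x y = (carpetRec n x y).flatMap carpetChildren := by
  induction n generalizing x y with
  | zero =>
      simp [carpetRec, carpetChildren, carpetOffsets, List.foldl, List.flatMap]
  | succ m ih =>
      rw [show carpetRec (m + 1 + 1) x y
            = carpetOffsets.foldl
                (fun out d => out ++ carpetRec (m + 1) (x * 3 + d.1) (y * 3 + d.2)) [] from rfl,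
        carpet_bfold, List.nil_append]
      rw [show carpetRec (m + 1) x y
            = carpetOffsets.foldl
                (fun out d => out ++ carpetRec m (x * 3 + d.1) (y * 3 + d.2)) [] from rfl,
        carpet_bfold, List.nil_append]
      simp only [ih]
      rw [List.flatMap_assoc]

-- A's outer loop, run n times, equals B's recursion
theorem carpet_iter_eq_rec (n : Nat) :
    (List.range n).foldl (fun s _ => carpetStep s) [((0 : Int), (0 : Int))] = carpetRec n 0 0 := by
  induction n with
  | zero => simp [carpetRec]
  | succ m ih =>
      rw [List.range_succ, List.foldl_append, ih, List.foldl_cons, List.foldl_nil,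
        carpetStep_eq_flatMap, carpetRec_succ_flat]

-- ===== VERDICT (by name: the statement is the Claim_ definition above) =====
theorem construct_sierpinski_carpet_spec : Claim_equal_construct_sierpinski_carpet := by
  intro iterations _
  unfold Spec_construct_sierpinski_carpet construct_sierpinski_carpet construct_sierpinski_carpet_alt
  rw [PySem.List.pyRange_one]
  rw [List.foldl_map]
  simpa using carpet_iter_eq_rec iterations.toNat
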